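-- pv_equiv track=rewrite | github.com/futesat/tokenlean | savings.py | render_rtk
-- ===== SOURCE A (Python) =====
-- RESET  = "\033[0m"
--
-- BOLD   = "\033[1m"
--
-- DIM    = "\033[2m"
--
-- GREEN  = "\033[32m"
--
-- YELLOW = "\033[33m"
--
-- def bold(s):   return f"{BOLD}{s}{RESET}"
--
-- def dim(s):    return f"{DIM}{s}{RESET}"
--
-- def green(s):  return f"{GREEN}{s}{RESET}"
--
-- def yellow(s): return f"{YELLOW}{s}{RESET}"
--
-- def render_rtk(text: str | None, width: int) -> list[str]:
--     sep = "─" * width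
--     lines = [
--         bold(green("  rtk") + dim("  output compression")),
--         dim(sep),
--     ]
--     if text is None:
--         lines.append(f"  {yellow('⚠')}  not installed — {dim('make install-rtk')}")
--         return lines
--
--     # Pass the raw output lines through, stripping the outer frame lines
--     # (═══ header/footer) but keeping everything else, indented by 2 spaces.
--     for line in text.splitlines():
--         stripped = line.rstrip()
--         # Skip blank lines at start, keep the rest
--         if stripped == "" and len(lines) == 2:
--             continue
--         lines.append("  " + stripped)
--     return lines
-- ===== SOURCE B (Python) =====
-- RESET  = "\033[0m"
-- BOLD   = "\033[1m"
-- DIM    = "\033[2m"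
-- GREEN  = "\033[32m"
-- YELLOW = "\033[33m"
--
-- def bold(s):   return f"{BOLD}{s}{RESET}"
-- def dim(s):    return f"{DIM}{s}{RESET}"
-- def green(s):  return f"{GREEN}{s}{RESET}"
-- def yellow(s): return f"{YELLOW}{s}{RESET}"
--
-- def render_rtk(text, width):
--     sep = "─" * width
--     lines = [
--         bold(green("  rtk") + dim("  output compression")),
--         dim(sep),
--     ]
--     if text is None:
--         lines.append(f"  {yellow('⚠')}  not installed — {dim('make install-rtk')}")
--         return lines
--     # Right-strip every line in one pass, drop the leading run of blank
--     # lines explicitly, then indent whatever remains.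
--     stripped = [line.rstrip() for line in text.splitlines()]
--     i = 0
--     while i < len(stripped) and stripped[i] == "":
--         i += 1
--     return lines + ["  " + s for s in stripped[i:]]
-- ===== Notes on version B (the rewrite author's own statement) =====
-- stated objective: simpler
-- what changed: Replaces the stateful fold whose 'len(lines)==2' sentinel decides whether a blank line is still leading with an explicit three-stage decomposition: rstrip all lines, drop the leading blank run, then map the two-space indent and append.
import Mathlib
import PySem

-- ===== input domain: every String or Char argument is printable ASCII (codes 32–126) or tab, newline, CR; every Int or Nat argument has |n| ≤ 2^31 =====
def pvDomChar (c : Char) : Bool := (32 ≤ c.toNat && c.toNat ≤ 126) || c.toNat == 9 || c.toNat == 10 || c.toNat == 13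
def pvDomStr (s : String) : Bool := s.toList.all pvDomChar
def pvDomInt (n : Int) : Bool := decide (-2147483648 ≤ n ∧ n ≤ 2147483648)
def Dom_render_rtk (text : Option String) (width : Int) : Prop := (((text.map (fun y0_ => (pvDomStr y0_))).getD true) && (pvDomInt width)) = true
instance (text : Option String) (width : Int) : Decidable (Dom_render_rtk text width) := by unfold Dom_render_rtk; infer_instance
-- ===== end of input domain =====

-- B replaces A's stateful 'len(lines)==2' leading-blank sentinel by an explicit
-- rstrip-all / drop-leading-blanks / indent-map decomposition (objective: simpler).
-- ===== PORT A =====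
def pvBold (s : String) : String := "\x1b[1m" ++ s ++ "\x1b[0m"
def pvDim (s : String) : String := "\x1b[2m" ++ s ++ "\x1b[0m"
def pvGreen (s : String) : String := "\x1b[32m" ++ s ++ "\x1b[0m"
def pvYellow (s : String) : String := "\x1b[33m" ++ s ++ "\x1b[0m"

def render_rtk (text : Option String) (width : Int) : List String :=
  let sep := String.ofList (List.replicate width.toNat '─')   -- "─" * width ('' for width ≤ 0)
  let lines := [pvBold (pvGreen "  rtk" ++ pvDim "  output compression"), pvDim sep]
  match text with
  | none => lines ++ ["  " ++ pvYellow "⚠" ++ "  not installed — " ++ pvDim "make install-rtk"]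
  | some t =>
    (PySem.Str.splitlines t).foldl (fun acc line =>
      let stripped := PySem.Str.rstrip line
      if stripped == "" && acc.length == 2 then acc
      else acc ++ ["  " ++ stripped]) lines

-- ===== PORT B =====
-- the 'while i < len(stripped) and stripped[i] == ""' advance of Source B
def pvDropBlank : List String → List String
  | [] => []
  | s :: rest => if s == "" then pvDropBlank rest else s :: rest

def render_rtk_alt (text : Option String) (width : Int) : List String :=
  let sep := String.ofList (List.replicate width.toNat '─')
  let lines := [pvBold (pvGreen "  rtk" ++ pvDim "  output compression"), pvDim sep]
  match text with
  | none => lines ++ ["  " ++ pvYellow "⚠" ++ "  not installed — " ++ pvDim "make install-rtk"]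
  | some t =>
    let stripped := (PySem.Str.splitlines t).map PySem.Str.rstrip
    lines ++ (pvDropBlank stripped).map (fun s => "  " ++ s)

-- ===== PRECONDITION & SPEC =====
def Spec_render_rtk (text : Option String) (width : Int) (out : List String) : Prop := out = render_rtk_alt text width
instance (text : Option String) (width : Int) (out : List String) : Decidable (Spec_render_rtk text width out) := by unfold Spec_render_rtk; infer_instance

-- ===== CLAIM (what is proved, stated in full; the proofs are below) =====
def Claim_equal_render_rtk : Prop := ∀ (text : Option String) (width : Int), Dom_render_rtk text width → Spec_render_rtk text width (render_rtk text width)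

-- ===== LEMMAS AND PROOFS =====

-- ===== VERDICT (by name: the statement is the Claim_ definition above) =====
theorem pv_loop_full (l : List String) (acc : List String) (h : 2 < acc.length) :
    l.foldl (fun acc line =>
      let stripped := PySem.Str.rstrip line
      if stripped == "" && acc.length == 2 then acc
      else acc ++ ["  " ++ stripped]) acc
    = acc ++ l.map (fun line => "  " ++ PySem.Str.rstrip line) := by
  induction l generalizing acc with
  | nil => simp
  | cons s rest ih =>
    simp only [List.foldl_cons, List.map_cons]
    have hne : (acc.length == 2) = false := by
      simp [Nat.ne_of_gt h]
    rw [hne]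
    simp only [Bool.and_false, Bool.false_eq_true, if_false]
    rw [ih _ (by simp; omega)]
    simp

theorem pv_loop_main (l : List String) (acc : List String) (h : acc.length = 2) :
    l.foldl (fun acc line =>
      let stripped := PySem.Str.rstrip line
      if stripped == "" && acc.length == 2 then acc
      else acc ++ ["  " ++ stripped]) acc
    = acc ++ (pvDropBlank (l.map PySem.Str.rstrip)).map (fun s => "  " ++ s) := by
  induction l generalizing acc with
  | nil => simp [pvDropBlank]
  | cons s rest ih =>
    simp only [List.foldl_cons, List.map_cons, pvDropBlank]
    by_cases hb : (PySem.Str.rstrip s == "") = true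
    · rw [hb]
      simp only [h, beq_self_eq_true, Bool.and_true, if_true]
      exact ih acc h
    · rw [Bool.not_eq_true] at hb
      simp only [hb, Bool.false_and, Bool.false_eq_true, if_false]
      rw [pv_loop_full rest _ (by simp [h])]
      simp

theorem render_rtk_spec : Claim_equal_render_rtk := by
  intro text width _
  unfold Spec_render_rtk render_rtk render_rtk_alt
  cases text with
  | none => rfl
  | some t =>
    simp only
    exact pv_loop_main _ _ rfl
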